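-- pv_equiv track=rewrite | github.com/timspb/rd6018_bot | charging_log.py | _find_current_session_start_idx
-- ===== SOURCE A (Python) =====
-- def _event_from_log_line(line: str) -> str:
--     parts = line.strip().split(" | ")
--     return parts[6].strip() if len(parts) > 6 else ""
--
-- def _find_current_session_start_idx(lines: list[str]) -> int:
--     """Session starts from last START, fallback to last RESTORE."""
--     last_start_idx = -1
--     last_restore_idx = -1
--     for idx, line in enumerate(lines):
--         event = _event_from_log_line(line)
--         if event.startswith("START"):
--             last_start_idx = idx
--         elif event.startswith("RESTORE"):
--             last_restore_idx = idx
--     return last_start_idx if last_start_idx != -1 else last_restore_idx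
-- ===== SOURCE B (Python) =====
-- def _event_from_log_line(line: str) -> str:
--     parts = line.strip().split(" | ")
--     return parts[6].strip() if len(parts) > 6 else ""
--
-- def _find_current_session_start_idx(lines: list[str]) -> int:
--     """Backward scan: return the first START seen from the end; else the first RESTORE seen from the end; else -1."""
--     last_restore_idx = -1
--     for idx in range(len(lines) - 1, -1, -1):
--         event = _event_from_log_line(lines[idx])
--         if event.startswith("START"):
--             return idx
--         if last_restore_idx == -1 and event.startswith("RESTORE"):
--             last_restore_idx = idx
--     return last_restore_idx
-- ===== Notes on version B (the rewrite author's own statement) =====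
-- stated objective: alternative
-- what changed: Replaced the forward two-accumulator sweep with a reverse scan that returns immediately at the first START seen from the end and remembers only the first RESTORE seen from the end.
import Mathlib
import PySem

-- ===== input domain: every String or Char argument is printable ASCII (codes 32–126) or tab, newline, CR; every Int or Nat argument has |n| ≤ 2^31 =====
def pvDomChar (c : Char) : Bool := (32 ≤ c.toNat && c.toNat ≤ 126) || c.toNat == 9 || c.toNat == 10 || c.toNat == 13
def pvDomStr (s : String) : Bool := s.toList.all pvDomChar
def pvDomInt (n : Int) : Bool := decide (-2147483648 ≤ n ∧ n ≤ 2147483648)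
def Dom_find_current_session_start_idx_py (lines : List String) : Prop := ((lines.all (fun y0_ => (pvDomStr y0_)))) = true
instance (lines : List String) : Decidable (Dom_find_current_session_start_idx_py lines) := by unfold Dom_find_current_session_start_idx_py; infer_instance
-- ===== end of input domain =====

-- B replaces A's forward two-accumulator sweep by a reverse scan with early exit on the first START seen from the end (objective: alternative decomposition, same O(n) cost).

-- ===== PORT A =====
-- shared helper: _event_from_log_line (identical in Source A and Source B)
def pvEventFromLogLine (line : String) : String :=
  -- split with a nonempty separator always succeeds, so getD [] is exact here
  let parts := (PySem.Str.split? (PySem.Str.strip line) " | ").getD []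
  if parts.length > 6 then PySem.Str.strip (parts.getD 6 "") else ""

def pvAStep (s : Int × Int) (p : Int × String) : Int × Int :=
  let ev := pvEventFromLogLine p.2
  if PySem.Str.startswith ev "START" = true then (p.1, s.2)
  else if PySem.Str.startswith ev "RESTORE" = true then (s.1, p.1)
  else s

def find_current_session_start_idx_py (lines : List String) : Int :=
  let st := (PySem.List.enumerate lines).foldl pvAStep (-1, -1)
  if st.1 ≠ -1 then st.1 else st.2

-- ===== PORT B =====
-- reverse loop: argument i is the number of indices still to visit (current index i-1)
def pvAltLoop (lines : List String) : Nat → Int → Int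
  | 0, lr => lr
  | i+1, lr =>
    let ev := pvEventFromLogLine (lines.getD i "")
    if PySem.Str.startswith ev "START" = true then (i : Int)
    else if lr = -1 ∧ PySem.Str.startswith ev "RESTORE" = true then pvAltLoop lines i (i : Int)
    else pvAltLoop lines i lr

def find_current_session_start_idx_py_alt (lines : List String) : Int :=
  pvAltLoop lines lines.length (-1)

-- ===== PRECONDITION & SPEC =====
def Spec_find_current_session_start_idx_py (lines : List String) (out : Int) : Prop := out = find_current_session_start_idx_py_alt lines
instance (lines : List String) (out : Int) : Decidable (Spec_find_current_session_start_idx_py lines out) := by unfold Spec_find_current_session_start_idx_py; infer_instance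

-- ===== CLAIM (what is proved, stated in full; the proofs are below) =====
def Claim_equal_find_current_session_start_idx_py : Prop := ∀ (lines : List String), Dom_find_current_session_start_idx_py lines → Spec_find_current_session_start_idx_py lines (find_current_session_start_idx_py lines)

-- ===== LEMMAS AND PROOFS =====

-- pvAltLoop only reads indices < i, so appending one element does not change it
lemma pvAltLoop_append (l : List String) (x : String) :
    ∀ (i : Nat), i ≤ l.length → ∀ lr : Int,
      pvAltLoop (l ++ [x]) i lr = pvAltLoop l i lr := by
  intro i
  induction i with
  | zero => intro _ lr; rfl
  | succ i ih =>
    intro h lr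
    have hlt : i < l.length := by omega
    have hg : (l ++ [x]).getD i "" = l.getD i "" := by
      simp [List.getD, List.getElem?_append_left hlt]
    simp only [pvAltLoop, hg]
    split_ifs with h1 h2
    · rfl
    · exact ih (by omega) _
    · exact ih (by omega) _

-- backward scan agrees with the forward two-accumulator fold
lemma pvAltLoop_eq_fold (l : List String) :
    ∀ lr : Int,
      pvAltLoop l l.length lr =
        (let st := (PySem.List.enumerate l).foldl pvAStep (-1, -1)
         if st.1 ≠ -1 then st.1 else if lr ≠ -1 then lr else st.2) := by
  induction l using List.reverseRecOn with
  | nil => intro lr; simp [pvAltLoop, PySem.List.enumerate_nil]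
  | append_singleton l x ih =>
    intro lr
    have hne : ((l.length : Int)) ≠ -1 := by omega
    have henum : PySem.List.enumerate (l ++ [x])
        = PySem.List.enumerate l ++ [((l.length : Int), x)] := by
      simp [PySem.List.enumerate_append, PySem.List.enumerate_cons, PySem.List.enumerate_nil]
    have hgd : (l ++ [x]).getD l.length "" = x := by simp [List.getD]
    have hL : (l ++ [x]).length = l.length + 1 := by simp
    rw [hL]
    simp only [pvAltLoop, hgd, henum, List.foldl_append, List.foldl, pvAStep]
    set st := List.foldl pvAStep (-1, -1) (PySem.List.enumerate l) with hst
    by_cases hS : PySem.Chars.startswith (pvEventFromLogLine x).toList (['S','T','A','R','T'] : List Char) = true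
    · simp [hS, hne]
    · by_cases hR : PySem.Chars.startswith (pvEventFromLogLine x).toList (['R','E','S','T','O','R','E'] : List Char) = true
      · rcases eq_or_ne lr (-1) with hlr | hlr
        · simp [hS, hR, hlr, pvAltLoop_append l x l.length le_rfl, ih, hne]
        · simp [hS, hR, hlr, pvAltLoop_append l x l.length le_rfl, ih]
      · simp [hS, hR, pvAltLoop_append l x l.length le_rfl, ih]

-- ===== VERDICT (by name: the statement is the Claim_ definition above) =====
theorem find_current_session_start_idx_py_spec : Claim_equal_find_current_session_start_idx_py := by
  intro lines _
  unfold Spec_find_current_session_start_idx_py find_current_session_start_idx_py find_current_session_start_idx_py_alt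
  rw [pvAltLoop_eq_fold]
  simp
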